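-- pv_equiv track=rewrite | github.com/GeonWooPaeng/Sort_gui | 201510298_팽건우/insertion.py | getColorArray
-- ===== SOURCE A (Python) =====
-- def getColorArray(data, jdx):
-- 	colorArray = []
-- 	for x in range(len(data)):
-- 		if x == jdx:
-- 			colorArray.append('Green')
-- 		elif x == jdx - 1:
-- 			colorArray.append('Blue')
-- 		else:
-- 			colorArray.append('Red')
-- 	return colorArray
-- ===== SOURCE B (Python) =====
-- def getColorArray(data, jdx):
--     # Build the answer as a concatenation of segments: a Red prefix, the
--     # optional 'Blue' and 'Green' markers, and a Red suffix filling up to n.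
--     n = len(data)
--     parts = ['Red'] * min(max(jdx - 1, 0), n)
--     if 0 <= jdx - 1 < n:
--         parts.append('Blue')
--     if 0 <= jdx < n:
--         parts.append('Green')
--     return parts + ['Red'] * (n - len(parts))
-- ===== Notes on version B (the rewrite author's own statement) =====
-- stated objective: alternative
-- what changed: Builds the result by segment concatenation (a clamped-length Red prefix, optional 'Blue' and 'Green' markers, and a Red suffix filling to length n) instead of A's per-index conditional loop.
import Mathlib
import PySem

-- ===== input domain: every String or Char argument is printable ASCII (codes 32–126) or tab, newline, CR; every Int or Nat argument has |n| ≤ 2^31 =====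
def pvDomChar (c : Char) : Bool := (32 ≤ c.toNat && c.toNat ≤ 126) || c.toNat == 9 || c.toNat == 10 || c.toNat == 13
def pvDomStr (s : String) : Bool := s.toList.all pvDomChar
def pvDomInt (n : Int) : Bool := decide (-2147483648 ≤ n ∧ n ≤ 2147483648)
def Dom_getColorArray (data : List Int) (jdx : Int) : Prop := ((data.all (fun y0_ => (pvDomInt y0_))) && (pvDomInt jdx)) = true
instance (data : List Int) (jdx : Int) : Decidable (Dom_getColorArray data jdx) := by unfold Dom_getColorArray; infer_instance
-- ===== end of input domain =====

-- B builds the result by concatenating segments (a clamped Red prefix, the optional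
-- 'Blue'/'Green' markers, and a Red suffix filling to length n) instead of A's
-- per-index conditional loop; objective: alternative.

-- ===== PORT A =====
def getColorArray (data : List Int) (jdx : Int) : List String :=
  (PySem.List.pyRange 0 (data.length : Int) 1).foldl
    (fun colorArray x =>
      if x = jdx then colorArray ++ ["Green"]
      else if x = jdx - 1 then colorArray ++ ["Blue"]
      else colorArray ++ ["Red"]) []

-- ===== PORT B =====
def getColorArray_alt (data : List Int) (jdx : Int) : List String :=
  let n : Int := data.length
  let parts := List.replicate (min (max (jdx - 1) 0) n).toNat "Red"
  let parts := if 0 ≤ jdx - 1 ∧ jdx - 1 < n then parts ++ ["Blue"] else parts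
  let parts := if 0 ≤ jdx ∧ jdx < n then parts ++ ["Green"] else parts
  parts ++ List.replicate (data.length - parts.length) "Red"

-- ===== PRECONDITION & SPEC =====
def Spec_getColorArray (data : List Int) (jdx : Int) (out : List String) : Prop := out = getColorArray_alt data jdx
instance (data : List Int) (jdx : Int) (out : List String) : Decidable (Spec_getColorArray data jdx out) := by unfold Spec_getColorArray; infer_instance

-- ===== CLAIM (what is proved, stated in full; the proofs are below) =====
def Claim_equal_getColorArray : Prop := ∀ (data : List Int) (jdx : Int), Dom_getColorArray data jdx → Spec_getColorArray data jdx (getColorArray data jdx)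

-- ===== LEMMAS AND PROOFS =====

-- A's loop, written as a map over the index range.
theorem getColorArray_eq_map (data : List Int) (jdx : Int) :
    getColorArray data jdx =
      (PySem.List.pyRange 0 (data.length : Int) 1).map (fun x =>
        if x = jdx then "Green"
        else if x = jdx - 1 then "Blue" else "Red") := by
  unfold getColorArray
  have hf : (fun (colorArray : List String) (x : Int) =>
      if x = jdx then colorArray ++ ["Green"]
      else if x = jdx - 1 then colorArray ++ ["Blue"]
      else colorArray ++ ["Red"]) =
      (fun colorArray x => colorArray ++
        [if x = jdx then "Green" else if x = jdx - 1 then "Blue" else "Red"]) := by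
    funext colorArray x; split_ifs <;> rfl
  rw [hf, PySem.List.foldl_append_singleton_eq_map, List.nil_append]

theorem alt_length (data : List Int) (jdx : Int) :
    (getColorArray_alt data jdx).length = data.length := by
  unfold getColorArray_alt
  dsimp only
  split_ifs <;> simp <;> omega

theorem alt_getElem (data : List Int) (jdx : Int) (i : Nat)
    (hlen : i < (getColorArray_alt data jdx).length) :
    (getColorArray_alt data jdx)[i] =
      if (i : Int) = jdx then "Green"
      else if (i : Int) = jdx - 1 then "Blue" else "Red" := by
  have hi : i < data.length := by rw [alt_length] at hlen; exact hlen
  unfold getColorArray_alt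
  dsimp only
  split_ifs with hb hg hg <;>
    simp only [List.getElem_append, List.length_append, List.length_replicate,
      List.getElem_replicate, List.length_cons, List.length_nil] <;>
    split_ifs <;> first
      | rfl
      | (simp_all only [List.getElem_cons_zero, List.getElem_replicate,
          List.getElem_singleton] <;> omega)
      | omega

theorem getColorArray_eq_alt (data : List Int) (jdx : Int) :
    getColorArray data jdx = getColorArray_alt data jdx := by
  rw [getColorArray_eq_map]
  apply List.ext_getElem
  · simp [PySem.List.length_pyRange_one, alt_length]
  · intro i h1 h2
    rw [List.getElem_map, PySem.List.getElem_pyRange_one, alt_getElem data jdx i h2]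
    norm_num

-- ===== VERDICT (by name: the statement is the Claim_ definition above) =====
theorem getColorArray_spec : Claim_equal_getColorArray := by
  intro data jdx _
  exact getColorArray_eq_alt data jdx
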